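-- pv_equiv track=rewrite | github.com/Aadityapaudel2/AEN5 | archive/shared_archives/private_desktop_seed_2026-03/root_surface_retired/qt_ui.py | _compat_argv
-- ===== SOURCE A (Python) =====
-- def _compat_argv(argv: list[str]) -> list[str]:
--     cleaned = [argv[0]]
--     skip_next = False
--     for idx, item in enumerate(argv[1:], start=1):
--         if skip_next:
--             skip_next = False
--             continue
--         if item in {"--port", "--path-prefix"}:
--             skip_next = True
--             continue
--         cleaned.append(item)
--     return cleaned
-- ===== SOURCE B (Python) =====
-- def _compat_argv(argv: list[str]) -> list[str]:
--     head, rest = argv[0], list(argv[1:])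
--     while True:
--         idx = None
--         for i, tok in enumerate(rest):
--             if tok in ("--port", "--path-prefix"):
--                 idx = i
--                 break
--         if idx is None:
--             return [head] + rest
--         del rest[idx:idx + 2]
-- ===== Notes on version B (the rewrite author's own statement) =====
-- stated objective: alternative
-- what changed: Replaces the single-pass skip_next state machine with a fixpoint loop that repeatedly scans for the first remaining flag and deletes the two-element slice [flag, argument], restarting the scan from the front until no flag is left.
import Mathlib
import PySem

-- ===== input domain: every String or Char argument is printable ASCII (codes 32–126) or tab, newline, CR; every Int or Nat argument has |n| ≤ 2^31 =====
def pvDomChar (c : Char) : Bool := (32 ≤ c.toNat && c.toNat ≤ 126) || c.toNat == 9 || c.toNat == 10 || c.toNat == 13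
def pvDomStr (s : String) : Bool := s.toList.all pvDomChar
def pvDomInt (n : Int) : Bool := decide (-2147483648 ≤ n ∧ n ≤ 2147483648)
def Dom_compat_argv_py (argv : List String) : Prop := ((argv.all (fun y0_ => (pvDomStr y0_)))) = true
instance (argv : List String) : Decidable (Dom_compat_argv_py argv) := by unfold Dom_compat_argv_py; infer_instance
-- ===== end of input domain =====

-- B replaces A's single-pass skip_next state machine by a fixpoint loop deleting the first [flag, argument] slice until none remains; return values proved equal whenever argv is nonempty (A raises IndexError on []).


-- item in {"--port", "--path-prefix"} (same membership test both sources make)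
def pvIsFlag (x : String) : Bool := x == "--port" || x == "--path-prefix"

-- ===== PORT A =====
-- A: for item in argv[1:], carrying (cleaned, skip_next); the enumerate index is unused.
def compat_argv_py_step (st : List String × Bool) (item : String) : List String × Bool :=
  if st.2 then (st.1, false)
  else if pvIsFlag item then (st.1, true)
  else (st.1 ++ [item], false)

def compat_argv_py (argv : List String) : List String :=
  match argv with
  | [] => []   -- Python raises IndexError on argv[0]; excluded by Pre_
  | h :: t => ((t.foldl compat_argv_py_step ([h], false))).1

-- ===== PORT B =====
-- B: the inner for-loop searching rest for the first flag; returns the prefix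
-- before the flag and the suffix after it (none if no flag occurs).
def compat_argv_py_find : List String → Option (List String × List String)
  | [] => none
  | x :: r =>
    if pvIsFlag x then some ([], r)
    else
      match compat_argv_py_find r with
      | none => none
      | some (pre, suf) => some (x :: pre, suf)

-- termination measure for the while-loop: del rest[idx:idx+2] shrinks the list
theorem compat_argv_py_find_len : ∀ (l pre suf : List String),
    compat_argv_py_find l = some (pre, suf) → pre.length + suf.length + 1 = l.length := by
  intro l
  induction l with
  | nil => intro pre suf h; simp [compat_argv_py_find] at h
  | cons x r ih =>
    intro pre suf h
    by_cases hx : pvIsFlag x = true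
    · simp [compat_argv_py_find, hx] at h
      obtain ⟨h1, h2⟩ := h
      simp [← h1, ← h2]
    · simp [compat_argv_py_find, hx] at h
      cases hf : compat_argv_py_find r with
      | none => rw [hf] at h; simp at h
      | some pq =>
        rw [hf] at h
        obtain ⟨p, q⟩ := pq
        simp at h
        obtain ⟨h1, h2⟩ := h
        have := ih p q hf
        simp [← h1, ← h2]; omega

-- B: while True: find first flag; if none, stop; else delete it and its argument
-- and restart the scan from the front.
def compat_argv_py_del (rest : List String) : List String :=
  match hf : compat_argv_py_find rest with
  | none => rest
  | some (pre, suf) => compat_argv_py_del (pre ++ suf.drop 1)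
termination_by rest.length
decreasing_by
  have := compat_argv_py_find_len rest pre suf hf
  simp [List.length_append]
  omega

def compat_argv_py_alt (argv : List String) : List String :=
  match argv with
  | [] => []   -- Python raises IndexError on argv[0]; excluded by Pre_
  | h :: t => h :: compat_argv_py_del t

-- ===== PRECONDITION & SPEC =====
-- Pre_ excludes only the empty list, on which A raises IndexError at argv[0].
def Pre_compat_argv_py (argv : List String) : Prop := argv ≠ []
instance (argv : List String) : Decidable (Pre_compat_argv_py argv) := by unfold Pre_compat_argv_py; infer_instance
def pvWitness_compat_argv_py : List String := (["prog", "--port", "8080", "x"])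
def Spec_compat_argv_py (argv : List String) (out : List String) : Prop := out = compat_argv_py_alt argv
instance (argv : List String) (out : List String) : Decidable (Spec_compat_argv_py argv out) := by unfold Spec_compat_argv_py; infer_instance

-- ===== CLAIM (what is proved, stated in full; the proofs are below) =====
def Claim_equal_compat_argv_py : Prop := ∀ (argv : List String), Dom_compat_argv_py argv → Pre_compat_argv_py argv → Spec_compat_argv_py argv (compat_argv_py argv)

-- ===== LEMMAS AND PROOFS =====
-- Proof-side reference function: the result of filtering a flag-free head one
-- element at a time (neither port computes with it).
def pvGo : List String → List String
  | [] => []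
  | [x] => if pvIsFlag x then [] else [x]
  | x :: y :: r => if pvIsFlag x then pvGo r else x :: pvGo (y :: r)

-- A's fold equals pvGo (loop invariant over skip_next).
theorem compat_argv_py_fold (l : List String) : ∀ acc : List String,
    (l.foldl compat_argv_py_step (acc, false)).1 = acc ++ pvGo l ∧
    (l.foldl compat_argv_py_step (acc, true)).1 = acc ++ pvGo l.tail := by
  induction l with
  | nil => intro acc; simp [pvGo]
  | cons x rest ih =>
    intro acc
    constructor
    · by_cases hx : pvIsFlag x = true
      · have := (ih acc).2
        cases rest with
        | nil => simp [compat_argv_py_step, hx, pvGo]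
        | cons y r => simpa [compat_argv_py_step, hx, pvGo] using this
      · have := (ih (acc ++ [x])).1
        cases rest with
        | nil => simp [compat_argv_py_step, hx, pvGo]
        | cons y r => simpa [compat_argv_py_step, hx, pvGo] using this
    · simpa [compat_argv_py_step] using (ih acc).1

theorem pvGo_all_nonflag : ∀ l : List String, (∀ x ∈ l, pvIsFlag x = false) → pvGo l = l := by
  intro l
  induction l with
  | nil => intro _; rfl
  | cons x r ih =>
    intro h
    have hx := h x (by simp)
    cases r with
    | nil => simp [pvGo, hx]
    | cons y s =>
      have := ih (fun z hz => h z (by simp [hz]))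
      simp [pvGo, hx, this]

theorem pvGo_cons_nonflag (x : String) (t : List String) (hx : pvIsFlag x = false) :
    pvGo (x :: t) = x :: pvGo t := by
  cases t with
  | nil => simp [pvGo, hx]
  | cons y s => simp [pvGo, hx]

theorem pvGo_append (pre : List String) : ∀ m : List String,
    (∀ x ∈ pre, pvIsFlag x = false) → pvGo (pre ++ m) = pre ++ pvGo m := by
  induction pre with
  | nil => intro m _; rfl
  | cons p pre' ih =>
    intro m h
    have hp := h p (by simp)
    have hrest := ih m (fun z hz => h z (by simp [hz]))
    rw [List.cons_append, pvGo_cons_nonflag p _ hp, hrest, List.cons_append]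

theorem pvGo_flag_cons (f : String) (suf : List String) (hf : pvIsFlag f = true) :
    pvGo (f :: suf) = pvGo (suf.drop 1) := by
  cases suf with
  | nil => simp [pvGo, hf]
  | cons y r => simp [pvGo, hf]

theorem compat_argv_py_find_none : ∀ l : List String,
    compat_argv_py_find l = none → ∀ x ∈ l, pvIsFlag x = false := by
  intro l
  induction l with
  | nil => intro _ x hx; simp at hx
  | cons a r ih =>
    intro h x hx
    by_cases ha : pvIsFlag a = true
    · simp [compat_argv_py_find, ha] at h
    · simp [compat_argv_py_find, ha] at h
      cases hf : compat_argv_py_find r with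
      | none =>
        rcases List.mem_cons.mp hx with hxa | hxr
        · subst hxa; exact Bool.eq_false_iff.mpr ha
        · exact ih hf x hxr
      | some pq => obtain ⟨p, q⟩ := pq; rw [hf] at h; simp at h

theorem compat_argv_py_find_some : ∀ (l pre suf : List String),
    compat_argv_py_find l = some (pre, suf) →
    ∃ f, pvIsFlag f = true ∧ l = pre ++ f :: suf ∧ ∀ x ∈ pre, pvIsFlag x = false := by
  intro l
  induction l with
  | nil => intro pre suf h; simp [compat_argv_py_find] at h
  | cons a r ih =>
    intro pre suf h
    by_cases ha : pvIsFlag a = true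
    · simp [compat_argv_py_find, ha] at h
      obtain ⟨h1, h2⟩ := h
      subst h1; subst h2
      exact ⟨a, ha, by simp, by simp⟩
    · simp [compat_argv_py_find, ha] at h
      cases hf : compat_argv_py_find r with
      | none => rw [hf] at h; simp at h
      | some pq =>
        obtain ⟨p, q⟩ := pq
        rw [hf] at h
        simp at h
        obtain ⟨h1, h2⟩ := h
        obtain ⟨f, hflag, heq, hpre⟩ := ih p q hf
        refine ⟨f, hflag, by simp [← h1, ← h2, heq], ?_⟩
        intro x hx
        rcases List.mem_cons.mp (h1 ▸ hx) with hxa | hxp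
        · subst hxa; exact Bool.eq_false_iff.mpr ha
        · exact hpre x hxp

-- B's fixpoint loop computes pvGo.
theorem compat_argv_py_del_eq : ∀ (n : ℕ) (l : List String), l.length ≤ n →
    compat_argv_py_del l = pvGo l := by
  intro n
  induction n with
  | zero =>
    intro l hl
    have : l = [] := List.length_eq_zero_iff.mp (Nat.le_zero.mp hl)
    subst this
    rw [compat_argv_py_del]
    split
    · simp [pvGo]
    · next pre suf hf => simp [compat_argv_py_find] at hf
  | succ n ih =>
    intro l hl
    rw [compat_argv_py_del]
    split
    · next hf => exact (pvGo_all_nonflag l (compat_argv_py_find_none l hf)).symm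
    · next pre suf hf =>
      obtain ⟨f, hflag, heq, hpre⟩ := compat_argv_py_find_some l pre suf hf
      have hlen := compat_argv_py_find_len l pre suf hf
      have hrec : (pre ++ suf.drop 1).length ≤ n := by
        simp [List.length_append]; omega
      rw [ih _ hrec, pvGo_append pre _ hpre, heq, pvGo_append pre _ hpre,
        pvGo_flag_cons f suf hflag]

-- ===== VERDICT (by name: the statement is the Claim_ definition above) =====
theorem compat_argv_py_spec : Claim_equal_compat_argv_py := by
  intro argv _ hpre
  cases argv with
  | nil => exact absurd rfl hpre
  | cons h t =>
    show compat_argv_py (h :: t) = compat_argv_py_alt (h :: t)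
    simp only [compat_argv_py, compat_argv_py_alt]
    rw [compat_argv_py_del_eq t.length t (le_refl _)]
    simpa using (compat_argv_py_fold t [h]).1
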